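-- pv_equiv track=rewrite | github.com/Seva5959/GeekBrains | банкомат/ATM.py | tab_4_num
-- ===== SOURCE A (Python) =====
-- def tab_4_num(num):
--     count = 0
--     data = ''
--     for i in str(num):
--         count += 1
--         data += i
--         if count % 4 == 0:
--             data += ' '
--     return data
-- ===== SOURCE B (Python) =====
-- def tab_4_num(num):
--     s = str(num)
--     out = ''
--     while len(s) >= 4:
--         out += s[:4] + ' '
--         s = s[4:]
--     return out + s
-- ===== Notes on version B (the rewrite author's own statement) =====
-- stated objective: simpler
-- what changed: B peels complete four-character slices off the front of the string in a whole-chunk loop instead of walking every character with a modular counter; each full chunk gets a trailing space.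
import Mathlib
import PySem

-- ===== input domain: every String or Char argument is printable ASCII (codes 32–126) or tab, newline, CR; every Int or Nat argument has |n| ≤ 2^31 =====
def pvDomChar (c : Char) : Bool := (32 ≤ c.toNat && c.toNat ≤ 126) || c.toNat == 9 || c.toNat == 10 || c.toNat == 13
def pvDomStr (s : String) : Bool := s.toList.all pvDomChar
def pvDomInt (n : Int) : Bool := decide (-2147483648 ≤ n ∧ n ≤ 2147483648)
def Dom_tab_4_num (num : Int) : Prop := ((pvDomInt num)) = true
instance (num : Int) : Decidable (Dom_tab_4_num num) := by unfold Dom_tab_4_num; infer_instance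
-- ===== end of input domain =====

-- B replaces A's per-character walk with a modular counter by a loop that peels
-- complete four-character slices off the front of the string (objective: simpler).

-- ===== PORT A =====
-- per-character loop: count += 1; data += i; if count % 4 == 0: data += ' '
def tab4GoA : Int → List Char → List Char → List Char
  | _, data, [] => data
  | count, data, i :: rest =>
      let count := count + 1
      let data := data ++ [i]
      let data := if PySem.Int.mod count 4 = 0 then data ++ [' '] else data
      tab4GoA count data rest

def tab_4_num (num : Int) : String :=
  String.ofList (tab4GoA 0 [] (PySem.Int.toChars num))

-- ===== PORT B =====
-- while len(s) >= 4: out += s[:4] + ' '; s = s[4:]   then return out + s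
def tab4Peel (out : List Char) (s : List Char) : List Char :=
  if _h : 4 ≤ s.length then
    tab4Peel (out ++ PySem.List.slice s none (some 4) ++ [' ']) (PySem.List.slice s (some 4) none)
  else
    out ++ s
termination_by s.length
decreasing_by
  show (PySem.List.slice s (some 4) none).length < s.length
  rw [PySem.List.slice_some_none]
  simp [PySem.List.clampIdx]
  omega

def tab_4_num_alt (num : Int) : String :=
  String.ofList (tab4Peel [] (PySem.Int.toChars num))

-- ===== PRECONDITION & SPEC =====
def Spec_tab_4_num (num : Int) (out : String) : Prop := out = tab_4_num_alt num
instance (num : Int) (out : String) : Decidable (Spec_tab_4_num num out) := by unfold Spec_tab_4_num; infer_instance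

-- ===== CLAIM (what is proved, stated in full; the proofs are below) =====
def Claim_equal_tab_4_num : Prop := ∀ (num : Int), Dom_tab_4_num num → Spec_tab_4_num num (tab_4_num num)

-- ===== LEMMAS AND PROOFS =====

theorem pymod4 (n : Int) : PySem.Int.mod n 4 = n % 4 := by
  simp [PySem.Int.mod, Int.fmod_eq_emod]

theorem tab4_main (s : List Char) (out : List Char) (count : Int)
    (hc : PySem.Int.mod count 4 = 0) : tab4GoA count out s = tab4Peel out s := by
  induction hn : s.length using Nat.strong_induction_on generalizing s out count with
  | _ n ih =>
    rw [pymod4] at hc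
    match s with
    | [] =>
        rw [tab4Peel.eq_def]
        simp [tab4GoA]
    | [a] =>
        have h1 : ¬ ((count + 1) % 4 = 0) := by omega
        rw [tab4Peel.eq_def]
        simp [tab4GoA, h1]
    | [a, b] =>
        have h1 : ¬ ((count + 1) % 4 = 0) := by omega
        have h2 : ¬ ((count + 1 + 1) % 4 = 0) := by omega
        rw [tab4Peel.eq_def]
        simp [tab4GoA, h1, h2]
    | [a, b, c] =>
        have h1 : ¬ ((count + 1) % 4 = 0) := by omega
        have h2 : ¬ ((count + 1 + 1) % 4 = 0) := by omega
        have h3 : ¬ ((count + 1 + 1 + 1) % 4 = 0) := by omega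
        rw [tab4Peel.eq_def]
        simp [tab4GoA, h1, h2, h3]
    | a :: b :: c :: d :: t =>
        have h1 : ¬ ((count + 1) % 4 = 0) := by omega
        have h2 : ¬ ((count + 1 + 1) % 4 = 0) := by omega
        have h3 : ¬ ((count + 1 + 1 + 1) % 4 = 0) := by omega
        have h4 : (count + 1 + 1 + 1 + 1) % 4 = 0 := by omega
        rw [tab4Peel.eq_def]
        have hlen : 4 <= (a :: b :: c :: d :: t).length := by simp
        have hsl1 : PySem.List.slice (a :: b :: c :: d :: t) none (some 4) = [a, b, c, d] := by
          rw [PySem.List.slice_to (xs := a :: b :: c :: d :: t) (by norm_num)]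
          rfl
        have hsl2 : PySem.List.slice (a :: b :: c :: d :: t) (some 4) none = t := by
          rw [PySem.List.slice_from (xs := a :: b :: c :: d :: t) (by norm_num)]
          rfl
        simp only [hlen, dite_true, hsl1, hsl2]
        simp only [tab4GoA, pymod4, h1, h2, h3, h4, if_false, if_pos]
        rw [ih t.length (by simp [*] at hn ⊢; omega)
              t (out ++ [a] ++ [b] ++ [c] ++ [d] ++ [' ']) (count + 1 + 1 + 1 + 1)
              (by rw [pymod4]; exact h4) rfl]
        congr 1
        simp

theorem tab_4_num_spec : Claim_equal_tab_4_num := by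
  intro num _
  unfold Spec_tab_4_num tab_4_num tab_4_num_alt
  rw [tab4_main _ _ _ (by decide)]
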